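-- pv_equiv track=rewrite | github.com/neerajsinghjr/dsa | neetcode/02_two_pointers/p009_remove_duplicate_sorted_list_2.py | ansv1
-- ===== SOURCE A (Python) =====
-- def ansv1(nums, n):
--     """
--     _run: accepted
--     _code: time: o(n), space: o(1)
--     _study:
--     --- explanation ---
--     [+] simple explanation to approach is that we are using the two pointer $left and $right.
--     $right pointer will traverse normally but $left pointer will trace unique record with
--     max 2 occurrence's count.
--     [+] loop_1 : we are using a nested while_loop that will use $right pointer to traverse
--     the list in a sequentially manner to trace the count of duplicate numbers. after counting
--     the occcurrence of duplicate number, we have to consider the min(2, duplicate_number_count)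
--     [+] loop_2 : we are using another for_loop that will use the $left pointer to fill up the
--     occurrence of ith number inside the $nums using min(2, duplicate_number_count)
--     [+] finally return the $left pointer
--     """
--     l, r = 0, 0
--
--     while r < n:
--         count = 1
--
--         # l1: check duplicate from the next index;;
--         while r + 1 < n and nums[r] == nums[r + 1]:
--             r += 1
--             count += 1
--
--         # l2: replacing the ith index with value 2 time;;
--         for _ in range(min(2, count)):
--             nums[l] = nums[r]
--             l += 1
--
--         # increament r for the next iteration;;
--         r += 1
--
--     return l
-- ===== SOURCE B (Python) =====
-- def ansv1(nums, n):
--     # Filter-then-write: keep index i iff it is not the 3rd+ element of a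
--     # consecutive run, detected by the local window nums[i-2..i]; then copy
--     # the kept prefix back. Mutates nums in place like A; same return value.
--     out = [nums[i] for i in range(n)
--            if i < 2 or nums[i] != nums[i - 1] or nums[i] != nums[i - 2]]
--     for k in range(len(out)):
--         nums[k] = out[k]
--     return len(out)
-- ===== Notes on version B (the rewrite author's own statement) =====
-- stated objective: alternative
-- what changed: Replaces A's two-pointer nested-loop run counting (inner while counting a run, then min(2,count) interleaved writes) by a stateless local-window filter: index i is kept iff i<2 or nums[i]!=nums[i-1] or nums[i]!=nums[i-2], then the kept prefix is copied back; no run lengths or write pointer are maintained during the scan.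
import Mathlib
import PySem

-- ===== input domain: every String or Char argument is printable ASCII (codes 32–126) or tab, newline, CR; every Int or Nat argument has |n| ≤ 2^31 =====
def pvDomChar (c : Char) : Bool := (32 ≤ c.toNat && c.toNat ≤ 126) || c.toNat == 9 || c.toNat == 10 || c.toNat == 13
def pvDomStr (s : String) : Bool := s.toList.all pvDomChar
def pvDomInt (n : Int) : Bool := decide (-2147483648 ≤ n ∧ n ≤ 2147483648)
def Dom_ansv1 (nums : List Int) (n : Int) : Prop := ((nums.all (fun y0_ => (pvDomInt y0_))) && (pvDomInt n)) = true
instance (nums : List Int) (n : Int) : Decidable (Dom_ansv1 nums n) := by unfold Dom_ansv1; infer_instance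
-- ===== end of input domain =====

-- B replaces A's two-pointer nested-loop run counting by a local-window filter
-- (keep index i iff i < 2 or nums[i] != nums[i-1] or nums[i] != nums[i-2]) plus a copy-back pass.
-- Both Pythons mutate nums in place (identically); the equivalence proved here is about the return value.
-- Each while loop of A is ported with a Nat fuel that merely makes the same computation total:
-- the loop variable moves towards n by at least 1 per step, so fuel n.toNat is never exhausted.

-- ===== PORT A =====

-- nums[i]; under Pre_ every index read is in range, so the getD 0 default is never taken there
def pvGet (nums : List Int) (i : Int) : Int := (PySem.List.pyGet? nums i).getD 0

-- inner while: while r + 1 < n and nums[r] == nums[r + 1]: r += 1; count += 1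
def aRunF (nums : List Int) (n : Int) : Nat → Int → Int → Int × Int
  | 0, r, count => (r, count)
  | k + 1, r, count =>
    if r + 1 < n ∧ pvGet nums r = pvGet nums (r + 1) then aRunF nums n k (r + 1) (count + 1)
    else (r, count)

-- the for-loop over range(min(2, count)): one nums[l] = nums[r] write (and l += 1) per step
def aWrite (nums : List Int) (l r' c : Int) : List Int × Int :=
  (PySem.List.pyRange 0 (min 2 c) 1).foldl
    (fun (st : List Int × Int) _ => (st.1.set st.2.toNat (pvGet st.1 r'), st.2 + 1)) (nums, l)

-- outer while loop of A (nums is loop state: the writes feed the next iteration)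
def aLoopF (n : Int) : Nat → List Int → Int → Int → Int
  | 0, _, l, _ => l
  | k + 1, nums, l, r =>
    if r < n then
      aLoopF n k (aWrite nums l (aRunF nums n (k + 1) r 1).1 (aRunF nums n (k + 1) r 1).2).1
        (aWrite nums l (aRunF nums n (k + 1) r 1).1 (aRunF nums n (k + 1) r 1).2).2
        ((aRunF nums n (k + 1) r 1).1 + 1)
    else l

def ansv1 (nums : List Int) (n : Int) : Int := aLoopF n n.toNat nums 0 0

-- ===== PORT B =====

-- the comprehension: [nums[i] for i in range(n) if i < 2 or nums[i] != nums[i-1] or nums[i] != nums[i-2]]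
def bBuild (nums : List Int) (n : Int) : List Int :=
  (PySem.List.pyRange 0 n 1).foldl
    (fun out i =>
      if i < 2 ∨ pvGet nums i ≠ pvGet nums (i - 1) ∨ pvGet nums i ≠ pvGet nums (i - 2) then
        out ++ [pvGet nums i]
      else out) []

-- Source B's copy-back of out into nums is value-irrelevant for the returned length
def ansv1_alt (nums : List Int) (n : Int) : Int := ((bBuild nums n).length : Int)

-- ===== PRECONDITION & SPEC =====
-- Pre_ excludes exactly the inputs where the Python A raises IndexError: n beyond the list's length.
def Pre_ansv1 (nums : List Int) (n : Int) : Prop := n ≤ (nums.length : Int)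
instance (nums : List Int) (n : Int) : Decidable (Pre_ansv1 nums n) := by unfold Pre_ansv1; infer_instance
def pvWitness_ansv1 : List Int × Int := ([1, 1, 1, 2, 2, 3], 6)

def Spec_ansv1 (nums : List Int) (n : Int) (out : Int) : Prop := out = ansv1_alt nums n
instance (nums : List Int) (n : Int) (out : Int) : Decidable (Spec_ansv1 nums n out) := by unfold Spec_ansv1; infer_instance

-- ===== CLAIM (what is proved, stated in full; the proofs are below) =====
def Claim_equal_ansv1 : Prop := ∀ (nums : List Int) (n : Int), Dom_ansv1 nums n → Pre_ansv1 nums n → Spec_ansv1 nums n (ansv1 nums n)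

-- ===== LEMMAS AND PROOFS =====

-- C nums n i = how many indices in [i, n) B's filter keeps (recursive form of the fold)
def cnt (nums : List Int) (n : Int) : Nat → Int → Int
  | 0, _ => 0
  | k + 1, i =>
    if i < n then
      (if i < 2 ∨ pvGet nums i ≠ pvGet nums (i - 1) ∨ pvGet nums i ≠ pvGet nums (i - 2) then 1 else 0)
        + cnt nums n k (i + 1)
    else 0

def C (nums : List Int) (n i : Int) : Int := cnt nums n (n - i).toNat i

theorem cnt_stop (nums : List Int) (n : Int) (k : Nat) (i : Int) (h : ¬ i < n) :
    cnt nums n k i = 0 := by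
  cases k with
  | zero => rfl
  | succ k => rw [cnt, if_neg h]

theorem C_step (nums : List Int) (n i : Int) (hi : i < n) :
    C nums n i =
      (if i < 2 ∨ pvGet nums i ≠ pvGet nums (i - 1) ∨ pvGet nums i ≠ pvGet nums (i - 2) then 1 else 0)
        + C nums n (i + 1) := by
  unfold C
  have h1 : (n - i).toNat = (n - (i + 1)).toNat + 1 := by omega
  rw [h1, cnt, if_pos hi]

theorem C_stop (nums : List Int) (n i : Int) (h : ¬ i < n) : C nums n i = 0 :=
  cnt_stop nums n _ i h

-- the fold of B equals the recursive count
theorem bBuild_len (nums : List Int) (n : Int) :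
    ∀ (k : Nat) (a : Int) (out : List Int), (n - a).toNat ≤ k →
      (((PySem.List.pyRange a n 1).foldl
        (fun out i =>
          if i < 2 ∨ pvGet nums i ≠ pvGet nums (i - 1) ∨ pvGet nums i ≠ pvGet nums (i - 2) then
            out ++ [pvGet nums i]
          else out) out).length : Int) = (out.length : Int) + C nums n a := by
  intro k
  induction k with
  | zero =>
    intro a out hk
    rw [PySem.List.pyRange_one_eq_nil (by omega), C_stop nums n a (by omega)]
    simp
  | succ k ih =>
    intro a out hk
    by_cases ha : a < n
    · rw [PySem.List.pyRange_one_cons ha, List.foldl_cons, C_step nums n a ha,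
        ih (a + 1) _ (by omega)]
      split_ifs with h
      · simp; ring
      · simp
    · rw [PySem.List.pyRange_one_eq_nil (by omega), C_stop nums n a (by omega)]
      simp

-- reading an untouched position is unaffected by a write
theorem pvGet_set_ne (xs : List Int) (m : Nat) (v : Int) (i : Int)
    (h : 0 ≤ i) (hne : i ≠ (m : Int)) : pvGet (xs.set m v) i = pvGet xs i := by
  have hm : m ≠ i.toNat := by omega
  simp [pvGet, PySem.List.pyGet?_of_nonneg _ h, List.getElem?_set_ne hm]

-- aRunF never moves r backwards
theorem aRunF_fst_ge (nums : List Int) (n : Int) :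
    ∀ (k : Nat) (r count : Int), r ≤ (aRunF nums n k r count).1 := by
  intro k
  induction k with
  | zero => intro r count; simp [aRunF]
  | succ k ih =>
    intro r count
    rw [aRunF]
    split_ifs with h
    · have := ih (r + 1) (count + 1); omega
    · simp

-- aRunF's count just counts the steps of r
theorem aRunF_count (nums : List Int) (n : Int) :
    ∀ (k : Nat) (r count : Int), (aRunF nums n k r count).2 = count + ((aRunF nums n k r count).1 - r) := by
  intro k
  induction k with
  | zero => intro r count; simp [aRunF]
  | succ k ih =>
    intro r count
    rw [aRunF]
    split_ifs with h
    · rw [ih]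
      have := aRunF_fst_ge nums n k (r + 1) (count + 1)
      omega
    · simp

-- aRunF never runs past n
theorem aRunF_lt (nums : List Int) (n : Int) :
    ∀ (k : Nat) (r count : Int), r < n → (aRunF nums n k r count).1 < n := by
  intro k
  induction k with
  | zero => intro r count h; simpa [aRunF] using h
  | succ k ih =>
    intro r count h
    rw [aRunF]
    split_ifs with hg
    · exact ih (r + 1) (count + 1) (by omega)
    · simpa using h

-- aRunF only reads positions ≥ r, so it is insensitive to the already-written prefix
theorem aRunF_congr (nums nums' : List Int) (n : Int) :
    ∀ (k : Nat) (r count : Int), (∀ i, r ≤ i → pvGet nums' i = pvGet nums i) →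
      aRunF nums' n k r count = aRunF nums n k r count := by
  intro k
  induction k with
  | zero => intro r count _; rfl
  | succ k ih =>
    intro r count hag
    rw [aRunF, aRunF]
    have : (r + 1 < n ∧ pvGet nums' r = pvGet nums' (r + 1)) ↔
        (r + 1 < n ∧ pvGet nums r = pvGet nums (r + 1)) := by
      rw [hag r (by omega), hag (r + 1) (by omega)]
    rw [if_congr this rfl rfl]
    split_ifs with h
    · exact ih (r + 1) (count + 1) (fun i hi => hag i (by omega))
    · rfl

-- every index strictly inside the run found by aRunF equals its left neighbour
theorem aRunF_run (nums : List Int) (n : Int) :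
    ∀ (k : Nat) (r count i : Int), r < i → i ≤ (aRunF nums n k r count).1 →
      pvGet nums i = pvGet nums (i - 1) := by
  intro k
  induction k with
  | zero => intro r count i h1 h2; simp [aRunF] at h2; omega
  | succ k ih =>
    intro r count i h1 h2
    rw [aRunF] at h2
    split_ifs at h2 with hg
    · by_cases hi : i = r + 1
      · subst hi; simpa using hg.2.symm
      · exact ih (r + 1) (count + 1) i (by omega) h2
    · simp at h2; omega

-- with sufficient fuel, the run really is maximal: the guard fails at the result
theorem aRunF_exit (nums : List Int) (n : Int) :
    ∀ (k : Nat) (r count : Int), (n - r).toNat ≤ k →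
      ¬((aRunF nums n k r count).1 + 1 < n ∧
        pvGet nums (aRunF nums n k r count).1 = pvGet nums ((aRunF nums n k r count).1 + 1)) := by
  intro k
  induction k with
  | zero => intro r count hk; simp [aRunF]; omega
  | succ k ih =>
    intro r count hk
    rw [aRunF]
    split_ifs with hg
    · exact ih (r + 1) (count + 1) (by omega)
    · simpa using hg

-- inside a run, the filter drops everything from the third element on
theorem C_drop (nums : List Int) (n r r' : Int) (hr0 : 0 ≤ r)
    (hrun : ∀ i, r < i → i ≤ r' → pvGet nums i = pvGet nums (i - 1)) (hr' : r' < n) :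
    ∀ (m : Nat) (j : Int), j = r' + 1 - (m : Int) → r + 2 ≤ j →
      C nums n j = C nums n (r' + 1) := by
  intro m
  induction m with
  | zero => intro j hj _; rw [hj]; norm_num
  | succ m ih =>
    intro j hj h2
    have hjr : j ≤ r' := by push_cast at hj; omega
    have hkeep : ¬(j < 2 ∨ pvGet nums j ≠ pvGet nums (j - 1) ∨ pvGet nums j ≠ pvGet nums (j - 2)) := by
      have e1 : pvGet nums j = pvGet nums (j - 1) := hrun j (by omega) hjr
      have e2 : pvGet nums (j - 1) = pvGet nums (j - 2) := by
        have := hrun (j - 1) (by omega) (by omega)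
        simpa [show j - 1 - 1 = j - 2 by ring] using this
      push Not
      refine ⟨by omega, e1, e1.trans e2⟩
    rw [C_step nums n j (by omega), if_neg hkeep]
    rw [ih (j + 1) (by omega) (by omega)]
    ring

-- over one maximal run starting at a run boundary, the filter keeps min(2, run length) elements
theorem C_run (nums : List Int) (n r r' : Int) (hr0 : 0 ≤ r) (hr : r < n) (hrr : r ≤ r') (hr' : r' < n)
    (hrun : ∀ i, r < i → i ≤ r' → pvGet nums i = pvGet nums (i - 1))
    (hstart : r = 0 ∨ pvGet nums r ≠ pvGet nums (r - 1)) :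
    C nums n r = min 2 (r' - r + 1) + C nums n (r' + 1) := by
  have hkeep0 : r < 2 ∨ pvGet nums r ≠ pvGet nums (r - 1) ∨ pvGet nums r ≠ pvGet nums (r - 2) := by
    rcases hstart with h | h
    · left; omega
    · right; left; exact h
  by_cases hone : r' = r
  · rw [C_step nums n r hr, if_pos hkeep0, hone]
    have : min 2 (r - r + 1) = 1 := by omega
    rw [this]
  · -- r' ≥ r + 1: first two kept, rest dropped
    have hr1 : r + 1 ≤ r' := by omega
    have hkeep1 : r + 1 < 2 ∨ pvGet nums (r + 1) ≠ pvGet nums (r + 1 - 1) ∨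
        pvGet nums (r + 1) ≠ pvGet nums (r + 1 - 2) := by
      by_cases hr0 : r = 0
      · left; omega
      · right; right
        have e1 : pvGet nums (r + 1) = pvGet nums r := by
          simpa using hrun (r + 1) (by omega) hr1
        have hne : pvGet nums r ≠ pvGet nums (r - 1) := by
          rcases hstart with h | h
          · exact absurd h hr0
          · exact h
        rw [show r + 1 - 2 = r - 1 by ring, e1]
        exact hne
    rw [C_step nums n r hr, if_pos hkeep0, C_step nums n (r + 1) (by omega), if_pos hkeep1]
    rw [show r + 1 + 1 = r + 2 by ring,
      C_drop nums n r r' hr0 hrun hr' (r' + 1 - (r + 2)).toNat (r + 2) (by omega) (by omega)]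
    have : min 2 (r' - r + 1) = 2 := by omega
    rw [this]
    ring

-- the main invariant: A's fused loop, run on any list agreeing with nums from run-start r on,
-- returns l plus the number of indices B's filter keeps from r on
theorem main_inv (nums : List Int) (n : Int) :
    ∀ (k : Nat) (nums' : List Int) (l r : Int), (n - r).toNat ≤ k →
      0 ≤ l → l ≤ r → (∀ i, r ≤ i → pvGet nums' i = pvGet nums i) →
      (r < n → (r = 0 ∨ pvGet nums r ≠ pvGet nums (r - 1))) →
      aLoopF n k nums' l r = l + C nums n r := by
  intro k
  induction k with
  | zero =>
    intro nums' l r hk _ _ _ _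
    rw [C_stop nums n r (by omega)]
    simp [aLoopF]
  | succ k ih =>
    intro nums' l r hk hl0 hlr hag hstart
    by_cases hr : r < n
    · rw [aLoopF, if_pos hr, aRunF_congr nums nums' n (k + 1) r 1 hag]
      have hge : r ≤ (aRunF nums n (k + 1) r 1).1 := aRunF_fst_ge nums n (k + 1) r 1
      have hlt : (aRunF nums n (k + 1) r 1).1 < n := aRunF_lt nums n (k + 1) r 1 hr
      have hrun := fun i h1 h2 => aRunF_run nums n (k + 1) r 1 i h1 h2
      have hexit := aRunF_exit nums n (k + 1) r 1 (by omega)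
      rw [aRunF_count nums n (k + 1) r 1]
      set r' := (aRunF nums n (k + 1) r 1).1 with hr'
      have hCrun : C nums n r = min 2 (r' - r + 1) + C nums n (r' + 1) :=
        C_run nums n r r' (by omega) hr hge hlt hrun (hstart hr)
      have hstart' : r' + 1 < n → (r' + 1 = 0 ∨ pvGet nums (r' + 1) ≠ pvGet nums (r' + 1 - 1)) := by
        intro hn
        right
        intro hcontra
        exact hexit ⟨hn, by simpa [show r' + 1 - 1 = r' by ring] using hcontra.symm⟩
      set c : Int := 1 + (r' - r) with hcdef
      have hc1 : 1 ≤ c := by omega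
      by_cases h2 : c < 2
      · -- min 2 c = 1: a single write at index l ≤ r'
        have hag' : ∀ i, r' + 1 ≤ i → pvGet (nums'.set l.toNat (pvGet nums' r')) i = pvGet nums i := by
          intro i hi
          rw [pvGet_set_ne _ _ _ _ (by omega) (by omega), hag i (by omega)]
        have hw : aWrite nums' l r' c = (nums'.set l.toNat (pvGet nums' r'), l + 1) := by
          have hm : min 2 c = 1 := by omega
          rw [aWrite, hm]
          have hrange : PySem.List.pyRange 0 1 1 = [0] := by decide
          rw [hrange]
          simp [List.foldl]
        rw [hw]
        rw [ih _ (l + 1) (r' + 1) (by omega) (by omega) (by omega) hag' hstart']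
        have hm : min 2 (r' - r + 1) = 1 := by omega
        rw [hCrun, hm]
        ring
      · -- min 2 c = 2: writes at indices l and l + 1, both ≤ r'
        have hag' : ∀ i, r' + 1 ≤ i →
            pvGet ((nums'.set l.toNat (pvGet nums' r')).set (l + 1).toNat
              (pvGet (nums'.set l.toNat (pvGet nums' r')) r')) i = pvGet nums i := by
          intro i hi
          rw [pvGet_set_ne _ _ _ _ (by omega) (by omega),
              pvGet_set_ne _ _ _ _ (by omega) (by omega), hag i (by omega)]
        have hw : aWrite nums' l r' c =
            ((nums'.set l.toNat (pvGet nums' r')).set (l + 1).toNat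
              (pvGet (nums'.set l.toNat (pvGet nums' r')) r'), l + 1 + 1) := by
          have hm : min 2 c = 2 := by omega
          rw [aWrite, hm]
          have hrange : PySem.List.pyRange 0 2 1 = [0, 1] := by decide
          rw [hrange]
          simp [List.foldl]
        rw [hw]
        rw [ih _ (l + 1 + 1) (r' + 1) (by omega) (by omega) (by omega) hag' hstart']
        have hm : min 2 (r' - r + 1) = 2 := by omega
        rw [hCrun, hm]
        ring
    · rw [aLoopF, if_neg hr, C_stop nums n r hr]
      simp

-- ===== VERDICT (by name: the statement is the Claim_ definition above) =====
theorem ansv1_spec : Claim_equal_ansv1 := by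
  intro nums n _ _
  unfold Spec_ansv1 ansv1 ansv1_alt bBuild
  rw [bBuild_len nums n n.toNat 0 [] (by omega)]
  rw [main_inv nums n n.toNat nums 0 0 (by omega) (by omega) (by omega) (fun i _ => rfl)
    (fun _ => Or.inl rfl)]
  simp
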